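-- pv_equiv track=rewrite | github.com/naniwazu/Python-cp-library | CRT.py | inv_gcd
-- ===== SOURCE A (Python) =====
-- def inv_gcd(a, b):
--     a %= b
--     if a == 0:
--         return (b, 0)
--     s = b
--     t = a
--     m0 = 0
--     m1 = 1
--     while t:
--         u = s // t
--         s -= t * u
--         m0 -= m1 * u
--         tmp = s
--         s = t
--         t = tmp
--         tmp = m0
--         m0 = m1
--         m1 = tmp
--     if m0 < 0:
--         m0 += b // s
--     return (s, m0)
-- ===== SOURCE B (Python) =====
-- def inv_gcd(a, b):
--     a %= b
--     if a == 0: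
--         return (b, 0)
--     # forward pass: plain Euclid on (b, a), recording the quotient list
--     qs = []
--     s, t = b, a
--     while t:
--         qs.append(s // t)
--         s, t = t, s % t
--     g = s
--     # backward pass: back-substitute the quotients to get Bezout coefficients
--     # invariant: after processing, b*x + a*y == g
--     x, y = 1, 0
--     for q in reversed(qs):
--         x, y = y, x - q * y
--     if y < 0:
--         y += b // g
--     return (g, y)
-- ===== Notes on version B (the rewrite author's own statement) =====
-- stated objective: alternative
-- what changed: A's single extended-Euclid loop carrying coefficients (m0, m1) alongside the remainders is replaced by a two-pass algorithm: a forward plain-Euclid pass that records the quotient list and the gcd, then a backward pass that back-substitutes the reversed quotients to reconstruct the Bezout coefficient, normalized the same way.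
import Mathlib
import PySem

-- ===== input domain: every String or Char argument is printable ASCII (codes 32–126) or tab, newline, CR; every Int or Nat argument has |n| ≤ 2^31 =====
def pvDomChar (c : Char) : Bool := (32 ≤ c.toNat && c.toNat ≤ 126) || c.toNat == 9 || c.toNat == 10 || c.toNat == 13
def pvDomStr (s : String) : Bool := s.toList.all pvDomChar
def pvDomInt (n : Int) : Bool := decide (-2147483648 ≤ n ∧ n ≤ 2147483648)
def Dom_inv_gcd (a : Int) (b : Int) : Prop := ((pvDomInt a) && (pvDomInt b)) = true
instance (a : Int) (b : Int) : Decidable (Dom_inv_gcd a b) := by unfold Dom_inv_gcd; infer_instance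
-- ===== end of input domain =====

-- B replaces A's single extended-Euclid loop by two passes: forward quotient collection, backward back-substitution; objective: alternative decomposition.
-- Pre_: b ≠ 0 — Python A raises ZeroDivisionError at `a %= b` when b == 0.


-- termination helper for the recursions: |s % t| < |t| when t ≠ 0
theorem pvModAbsLt (s t : Int) (h : t ≠ 0) : (PySem.Int.mod s t).natAbs < t.natAbs := by
  rcases lt_or_gt_of_ne h with hneg | hpos
  · have := PySem.Int.mod_neg_bounds s hneg
    omega
  · have h1 := PySem.Int.mod_nonneg s hpos
    have h2 := PySem.Int.mod_lt s hpos
    omega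

-- ===== PORT A =====
-- A's while loop over state (s, t, m0, m1); `s -= t * u` is `s % t` for `u = s // t`
def invGcdLoop (s t m0 m1 : Int) : Int × Int :=
  if h : t = 0 then (s, m0)
  else invGcdLoop t (PySem.Int.mod s t) m1 (m0 - m1 * PySem.Int.floordiv s t)
termination_by t.natAbs
decreasing_by exact pvModAbsLt s t h

def inv_gcd (a : Int) (b : Int) : Int × Int :=
  let a' := PySem.Int.mod a b          -- a %= b  (b ≠ 0 by Pre_)
  if a' = 0 then (b, 0)
  else
    let r := invGcdLoop b a' 0 1
    let m0 := if r.2 < 0 then r.2 + PySem.Int.floordiv b r.1 else r.2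
    (r.1, m0)

-- ===== PORT B =====
-- forward pass: plain Euclid, returning (gcd, quotient list)
def euclidQuots (s t : Int) : Int × List Int :=
  if h : t = 0 then (s, [])
  else
    let r := euclidQuots t (PySem.Int.mod s t)
    (r.1, PySem.Int.floordiv s t :: r.2)
termination_by t.natAbs
decreasing_by exact pvModAbsLt s t h

-- backward pass: for q in reversed(qs): x, y = y, x - q*y, starting from (1, 0)
def backSub (qs : List Int) : Int × Int :=
  qs.reverse.foldl (fun p q => (p.2, p.1 - q * p.2)) (1, 0)

def inv_gcd_alt (a : Int) (b : Int) : Int × Int :=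
  let a' := PySem.Int.mod a b          -- a %= b  (b ≠ 0 by Pre_)
  if a' = 0 then (b, 0)
  else
    let e := euclidQuots b a'
    let p := backSub e.2
    let y := if p.2 < 0 then p.2 + PySem.Int.floordiv b e.1 else p.2
    (e.1, y)

-- ===== PRECONDITION & SPEC =====
-- Pre_: b ≠ 0 — the Python A raises ZeroDivisionError at `a %= b` when b == 0.
def Pre_inv_gcd (a : Int) (b : Int) : Prop := b ≠ 0
instance (a : Int) (b : Int) : Decidable (Pre_inv_gcd a b) := by unfold Pre_inv_gcd; infer_instance
def pvWitness_inv_gcd : Int × Int := (10, 7)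

def Spec_inv_gcd (a : Int) (b : Int) (out : Int × Int) : Prop := out = inv_gcd_alt a b
instance (a : Int) (b : Int) (out : Int × Int) : Decidable (Spec_inv_gcd a b out) := by unfold Spec_inv_gcd; infer_instance

-- ===== CLAIM (what is proved, stated in full; the proofs are below) =====
def Claim_equal_inv_gcd : Prop := ∀ (a : Int) (b : Int), Dom_inv_gcd a b → Pre_inv_gcd a b → Spec_inv_gcd a b (inv_gcd a b)

-- ===== LEMMAS AND PROOFS =====

-- back-substitution unfolds one quotient at a time (the FIRST quotient is processed last)
theorem backSub_cons (q : Int) (qs : List Int) :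
    backSub (q :: qs) = ((backSub qs).2, (backSub qs).1 - q * (backSub qs).2) := by
  simp [backSub, List.foldl_append]

-- A's loop state (s, t, m0, m1) combines the back-substituted coefficients linearly:
-- invGcdLoop s t m0 m1 = (g, m0 * x + m1 * y) where (g, qs) = euclidQuots s t, (x, y) = backSub qs.
theorem invGcdLoop_eq_backSub (s t m0 m1 : Int) :
    invGcdLoop s t m0 m1 =
      ((euclidQuots s t).1,
       m0 * (backSub (euclidQuots s t).2).1 + m1 * (backSub (euclidQuots s t).2).2) := by
  fun_induction invGcdLoop s t m0 m1 with
  | case1 s m0 m1 =>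
      rw [euclidQuots.eq_def]
      simp [backSub]
  | case2 s t m0 m1 h ih =>
      rw [ih]
      conv_rhs => rw [euclidQuots.eq_def]
      rw [dif_neg h]
      simp only [backSub_cons]
      ring_nf

-- ===== VERDICT (by name: the statement is the Claim_ definition above) =====
theorem inv_gcd_spec : Claim_equal_inv_gcd := by
  intro a b _ _
  unfold Spec_inv_gcd inv_gcd inv_gcd_alt
  by_cases h0 : PySem.Int.mod a b = 0
  · simp [h0]
  · simp only [h0]
    rw [invGcdLoop_eq_backSub]
    ring_nf
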